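-- pv_equiv track=rewrite | github.com/anatolegosset/Project_Euler | src/project_euler/problems/p100_149/p141_square_progressive_numbers.py | find_square_divisors
-- ===== SOURCE A (Python) =====
-- from collections import Counter
--
-- def find_square_divisors(factors: Counter, root: int):
--     divisors = [1]
--     for p, exp in factors.items():
--         divisors = [
--             new_div
--             for x in divisors
--             for i in range(2 * exp + 1)
--             if (new_div := x * (p**i)) < root
--         ]
--     return divisors
-- ===== SOURCE B (Python) =====
-- def find_square_divisors(factors, root):
--     # Depth-first search with an explicit stack (no per-prime list rebuild):
--     # each frame holds the remaining factors as a shared cons-chain of pairs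
--     # plus the partial product; branches whose partial product fails the
--     # < root test are pruned.  Children are pushed in reverse so results
--     # come out in the same lexicographic exponent order as A produces.
--     rest = None
--     for pe in reversed(list(factors.items())):
--         rest = (pe, rest)
--     out = []
--     stack = [(rest, 1)]
--     while stack:
--         rest, x = stack.pop()
--         if rest is None:
--             out.append(x)
--             continue
--         (p, exp), rest2 = rest
--         for i in reversed(range(2 * exp + 1)):
--             v = x * p ** i
--             if v < root:
--                 stack.append((rest2, v))
--     return out
-- ===== Notes on version B (the rewrite author's own statement) =====
-- stated objective: alternative
-- what changed: Replaces the level-by-level list rebuild (a comprehension re-materialising the whole divisor list once per prime) with an explicit-stack depth-first search over a shared cons-chain of factors that carries the partial product and prunes failing branches, emitting results in the same lexicographic order.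
import Mathlib
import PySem

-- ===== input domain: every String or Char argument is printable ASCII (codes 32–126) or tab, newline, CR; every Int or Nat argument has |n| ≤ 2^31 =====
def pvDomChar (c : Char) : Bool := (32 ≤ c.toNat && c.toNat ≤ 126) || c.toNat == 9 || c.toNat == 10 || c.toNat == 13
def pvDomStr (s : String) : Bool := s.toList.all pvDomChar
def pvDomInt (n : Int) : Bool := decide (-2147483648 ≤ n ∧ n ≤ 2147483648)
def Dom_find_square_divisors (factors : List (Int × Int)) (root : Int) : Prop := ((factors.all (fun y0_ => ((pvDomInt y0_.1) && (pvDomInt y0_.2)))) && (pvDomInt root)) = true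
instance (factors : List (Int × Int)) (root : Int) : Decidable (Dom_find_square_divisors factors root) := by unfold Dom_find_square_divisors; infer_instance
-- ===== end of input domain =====

-- B replaces A's per-prime list rebuild by an explicit-stack depth-first search carrying the partial product (alternative decomposition, same values and order).


-- ===== PORT A =====
-- divisors = [1]; per prime: divisors = [x*p**i for x in divisors for i in range(2*exp+1) if … < root]
def find_square_divisors (factors : List (Int × Int)) (root : Int) : List Int :=
  factors.foldl
    (fun divisors pe =>
      divisors.flatMap (fun x =>
        (PySem.List.pyRange 0 (2 * pe.2 + 1) 1).filterMap (fun i =>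
          if x * pe.1 ^ i.toNat < root then some (x * pe.1 ^ i.toNat) else none)))
    [1]

-- ===== PORT B =====
-- weight of a frame's remaining factor suffix: bounds the work the loop still does for it
def fsdWeight : List (Int × Int) → Nat
  | [] => 1
  | (_, e) :: r => 1 + (2 * e + 1).toNat * fsdWeight r

def fsdMeasure (stack : List (List (Int × Int) × Int)) : Nat :=
  (stack.map (fun f => fsdWeight f.1)).sum

-- termination helper, cited by name in decreasing_by
theorem fsd_sum_filterMap_le {α β : Type} (l : List α) (g : α → Option β) (h : β → Nat) (c : Nat)
    (hc : ∀ a b, g a = some b → h b = c) :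
    ((l.filterMap g).map h).sum ≤ l.length * c := by
  induction l with
  | nil => simp
  | cons a t ih =>
    rw [List.filterMap_cons]
    cases hg : g a with
    | none =>
      simp only [List.length_cons, Nat.succ_mul]
      omega
    | some b =>
      simp only [List.map_cons, List.sum_cons, hc a b hg, List.length_cons, Nat.succ_mul]
      omega

-- the while loop of Source B; the Python stack's top (list end) is this list's head,
-- so pushing reversed(range) = prepending the range in ascending order
def fsdLoop (root : Int) (stack : List (List (Int × Int) × Int)) (out : List Int) : List Int :=
  match stack with
  | [] => out
  | ([], x) :: stack' => fsdLoop root stack' (out ++ [x])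
  | ((p, e) :: rest2, x) :: stack' =>
      fsdLoop root
        (((PySem.List.pyRange 0 (2 * e + 1) 1).filterMap (fun i =>
            if x * p ^ i.toNat < root then some (rest2, x * p ^ i.toNat) else none)) ++ stack')
        out
termination_by fsdMeasure stack
decreasing_by
  · simp only [fsdMeasure, List.map_cons, List.sum_cons, fsdWeight]
    omega
  · simp only [fsdMeasure, List.map_append, List.sum_append, List.map_cons, List.sum_cons,
      fsdWeight]
    have h := fsd_sum_filterMap_le (PySem.List.pyRange 0 (2 * e + 1) 1)
      (fun i => if x * p ^ i.toNat < root then some (rest2, x * p ^ i.toNat) else none)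
      (fun f => fsdWeight f.1) (fsdWeight rest2)
      (by intro a b hab
          beta_reduce at hab
          split at hab
          · cases hab; rfl
          · cases hab)
    rw [PySem.List.length_pyRange_one] at h
    simp only [Int.sub_zero] at h
    simp only [dite_eq_ite]
    omega

-- rest = None; for pe in reversed(items): rest = (pe, rest)  — the cons-chain is a Lean list
def find_square_divisors_alt (factors : List (Int × Int)) (root : Int) : List Int :=
  fsdLoop root [(factors.reverse.foldl (fun rest pe => pe :: rest) [], 1)] []

-- ===== PRECONDITION & SPEC =====
def Spec_find_square_divisors (factors : List (Int × Int)) (root : Int) (out : List Int) : Prop := out = find_square_divisors_alt factors root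
instance (factors : List (Int × Int)) (root : Int) (out : List Int) : Decidable (Spec_find_square_divisors factors root out) := by unfold Spec_find_square_divisors; infer_instance

-- ===== CLAIM (what is proved, stated in full; the proofs are below) =====
def Claim_equal_find_square_divisors : Prop := ∀ (factors : List (Int × Int)) (root : Int), Dom_find_square_divisors factors root → Spec_find_square_divisors factors root (find_square_divisors factors root)

-- ===== LEMMAS AND PROOFS =====

-- proof-only reference function: the pruned DFS as structural recursion
def fsdDfs (root : Int) : List (Int × Int) → Int → List Int
  | [], x => [x]
  | (p, e) :: rest, x =>
    (PySem.List.pyRange 0 (2 * e + 1) 1).flatMap (fun i =>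
      if x * p ^ i.toNat < root then fsdDfs root rest (x * p ^ i.toNat) else [])

-- pushing a flatMap through a filterMap of an if-some/none
theorem flatMap_filterMap_ite {α β γ : Type} (l : List α) (c : α → Prop) [DecidablePred c]
    (f : α → β) (g : β → List γ) :
    (l.filterMap (fun i => if c i then some (f i) else none)).flatMap g
      = l.flatMap (fun i => if c i then g (f i) else []) := by
  induction l with
  | nil => rfl
  | cons a t ih =>
    simp only [List.filterMap_cons, List.flatMap_cons]
    split_ifs with h
    · simp only [List.flatMap_cons, ih]
    · simp only [ih, List.nil_append]

-- A-side invariant: folding A's step over fs starting from ds flatMaps the DFS over ds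
theorem foldl_eq_flatMap_fsdDfs (root : Int) (fs : List (Int × Int)) (ds : List Int) :
    fs.foldl
      (fun divisors pe =>
        divisors.flatMap (fun x =>
          (PySem.List.pyRange 0 (2 * pe.2 + 1) 1).filterMap (fun i =>
            if x * pe.1 ^ i.toNat < root then some (x * pe.1 ^ i.toNat) else none)))
      ds
      = ds.flatMap (fsdDfs root fs) := by
  induction fs generalizing ds with
  | nil => simp [fsdDfs]
  | cons pe rest ih =>
    obtain ⟨p, exp⟩ := pe
    rw [List.foldl_cons, ih, List.flatMap_assoc]
    apply List.flatMap_congr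
    intro x _
    exact flatMap_filterMap_ite _ (fun i : Int => x * p ^ i.toNat < root) (fun i : Int => x * p ^ i.toNat)
      (fsdDfs root rest)

-- B-side invariant: the stack loop emits out followed by the DFS of every frame in order
theorem fsdLoop_eq_flatMap (root : Int) (stack : List (List (Int × Int) × Int)) (out : List Int) :
    fsdLoop root stack out = out ++ stack.flatMap (fun f => fsdDfs root f.1 f.2) := by
  refine fsdLoop.induct root
    (fun stack out => fsdLoop root stack out = out ++ stack.flatMap (fun f => fsdDfs root f.1 f.2))
    ?_ ?_ ?_ stack out
  · intro out
    simp [fsdLoop]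
  · intro out x stack' ih
    rw [fsdLoop, ih]
    simp [fsdDfs]
  · intro out p e rest2 x stack' ih
    rw [fsdLoop]
    simp only [dite_eq_ite] at ih
    rw [ih, List.flatMap_append, List.flatMap_cons]
    rw [flatMap_filterMap_ite _ (fun i : Int => x * p ^ i.toNat < root)
      (fun i : Int => (rest2, x * p ^ i.toNat)) (fun f => fsdDfs root f.1 f.2)]
    simp [fsdDfs]

-- building a cons-chain from the reversed list yields the list itself
theorem foldl_cons_acc {α : Type} (l acc : List α) :
    l.foldl (fun rest pe => pe :: rest) acc = l.reverse ++ acc := by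
  induction l generalizing acc with
  | nil => rfl
  | cons a t ih => simp [List.foldl_cons, ih]

-- ===== VERDICT (by name: the statement is the Claim_ definition above) =====
theorem find_square_divisors_spec : Claim_equal_find_square_divisors := by
  intro factors root _
  unfold Spec_find_square_divisors find_square_divisors find_square_divisors_alt
  rw [foldl_eq_flatMap_fsdDfs, fsdLoop_eq_flatMap, foldl_cons_acc]
  simp
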